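-- pv_equiv track=rewrite | github.com/kazuhiko1979/edabit | 227_hard_Mind the Gap.py | gapful
-- ===== SOURCE A (Python) =====
-- def gapful(n):
--
-- 	i = 0
-- 	while True:
-- 		for x in (n-i, n+i):
-- 			s = str(x)
-- 			if x >= 100 and x % int(s[0] + s[-1]) == 0:
-- 				return x
-- 		i += 1
-- ===== SOURCE B (Python) =====
-- def gapful(n):
-- 	def divisor_ok(x):
-- 		s = str(x)
-- 		return x % int(s[0] + s[-1]) == 0
--
-- 	lower = None
-- 	x = n
-- 	while x >= 100:
-- 		if divisor_ok(x):
-- 			lower = x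
-- 			break
-- 		x -= 1
-- 	upper = n if n >= 100 else 100
-- 	while not divisor_ok(upper):
-- 		upper += 1
-- 	if lower is not None and n - lower <= upper - n:
-- 		return lower
-- 	return upper
-- ===== Notes on version B (the rewrite author's own statement) =====
-- stated objective: alternative
-- what changed: A interleaves one outward scan testing n-i then n+i per step; B runs two independent one-direction scans (downward bounded at 100 for the nearest lower gapful, upward from max(n,100) for the nearest upper one) and then compares the two distances, breaking ties toward the lower candidate.
import Mathlib
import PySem

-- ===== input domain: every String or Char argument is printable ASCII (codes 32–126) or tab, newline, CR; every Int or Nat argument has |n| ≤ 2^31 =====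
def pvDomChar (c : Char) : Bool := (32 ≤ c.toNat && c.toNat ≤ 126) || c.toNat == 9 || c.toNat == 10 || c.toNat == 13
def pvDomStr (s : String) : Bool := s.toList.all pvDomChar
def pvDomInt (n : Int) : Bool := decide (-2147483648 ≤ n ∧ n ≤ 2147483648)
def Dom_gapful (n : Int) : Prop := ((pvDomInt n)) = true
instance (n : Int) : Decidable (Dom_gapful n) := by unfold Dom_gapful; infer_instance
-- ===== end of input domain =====

-- B changes the decomposition (two bounded one-direction scans plus a distance comparison
-- instead of A's single interleaved outward scan); objective: alternative (much faster only
-- when n is far below 100, since B starts the upward scan at 100).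

-- ===== PORT A =====
-- x % int(str(x)[0] + str(x)[-1]); the '.getD' defaults are never reached when 100 ≤ x
-- (str(x) is nonempty and both ends are digits there); the short-circuit of Python's
-- 'x >= 100 and …' is the outer 'if' below.
def gapCheckA (x : Int) : Bool :=
  if 100 ≤ x then
    let s := PySem.Int.toChars x
    PySem.Int.mod x ((PySem.Int.ofChars? [(PySem.List.pyGet? s 0).getD '0',
        (PySem.List.pyGet? s (-1)).getD '0']).getD 0) == 0
  else false

-- the 'while True' loop; fuel bounds the number of iterations (10^10 is gapful and
-- ≥ n on the whole domain, so the fuel is never exhausted — proved below)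
def gapfulLoopA (n : Int) (i : Nat) : Nat → Int
  | 0 => 0
  | f + 1 =>
    if gapCheckA (n - i) then n - i
    else if gapCheckA (n + i) then n + i
    else gapfulLoopA n (i + 1) f

def gapful (n : Int) : Int := gapfulLoopA n 0 ((10 ^ 10 + 1 - n).toNat)

-- ===== PORT B =====
-- is_gapful's divisibility test (callers only use it on x ≥ 100)
def divisorOk (x : Int) : Bool :=
  let s := PySem.Int.toChars x
  PySem.Int.mod x ((PySem.Int.ofChars? [(PySem.List.pyGet? s 0).getD '0',
      (PySem.List.pyGet? s (-1)).getD '0']).getD 0) == 0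

-- downward scan 'while x >= 100'; fuel (n-99).toNat covers every x from n down to 100
def lowerScan (x : Int) : Nat → Option Int
  | 0 => none
  | f + 1 =>
    if 100 ≤ x then
      if divisorOk x then some x else lowerScan (x - 1) f
    else none

-- upward scan 'while not divisor_ok(upper)'; fuel never exhausted (proved below)
def upperScan (x : Int) : Nat → Int
  | 0 => 0
  | f + 1 => if divisorOk x then x else upperScan (x + 1) f

def gapful_alt (n : Int) : Int :=
  let lower := lowerScan n (n - 99).toNat
  let u0 : Int := if 100 ≤ n then n else 100
  let upper := upperScan u0 ((10 ^ 10 + 1 - u0).toNat)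
  match lower with
  | some l => if n - l ≤ upper - n then l else upper
  | none => upper

-- ===== PRECONDITION & SPEC =====
def Spec_gapful (n : Int) (out : Int) : Prop := out = gapful_alt n
instance (n : Int) (out : Int) : Decidable (Spec_gapful n out) := by unfold Spec_gapful; infer_instance

-- ===== CLAIM (what is proved, stated in full; the proofs are below) =====
def Claim_equal_gapful : Prop := ∀ (n : Int), Dom_gapful n → Spec_gapful n (gapful n)

-- ===== LEMMAS AND PROOFS =====

theorem gapCheckA_eq (x : Int) :
    gapCheckA x = if 100 ≤ x then divisorOk x else false := by
  simp [gapCheckA, divisorOk]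

theorem gapCheckA_true_iff (x : Int) :
    gapCheckA x = true ↔ 100 ≤ x ∧ divisorOk x = true := by
  rw [gapCheckA_eq]; split_ifs with h <;> simp [h]

theorem divisorOk_tenPow : divisorOk (10 ^ 10) = true := by decide

theorem gapCheckA_tenPow : gapCheckA (10 ^ 10) = true := by decide

theorem loopA_spec (n : Int)
    (hex : ∃ j : Nat, gapCheckA (n - j) = true ∨ gapCheckA (n + j) = true) :
    ∀ (f i : Nat),
      (∀ j < i, ¬ (gapCheckA (n - j) = true ∨ gapCheckA (n + j) = true)) →
      Nat.find hex < i + f →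
      gapfulLoopA n i f =
        (if gapCheckA (n - (Nat.find hex : Int)) = true then n - Nat.find hex
         else n + Nat.find hex) := by
  intro f
  induction f with
  | zero =>
    intro i hmin hlt
    exact absurd (Nat.find_spec hex) (hmin _ (by omega))
  | succ f ih =>
    intro i hmin hlt
    by_cases hQ : gapCheckA (n - i) = true ∨ gapCheckA (n + i) = true
    · have hfind : Nat.find hex = i :=
        le_antisymm (Nat.find_le hQ)
          (le_of_not_gt fun h => hmin _ h (Nat.find_spec hex))
      rw [hfind]
      rcases hQ with h1 | h2
      · simp [gapfulLoopA, h1]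
      · by_cases h1 : gapCheckA (n - i) = true
        · simp [gapfulLoopA, h1]
        · simp [gapfulLoopA, h1, h2]
    · push_neg at hQ
      have h1 := hQ.1
      have h2 := hQ.2
      simp only [gapfulLoopA, h1, h2, if_false, Bool.false_eq_true]
      have := ih (i + 1)
        (fun j hj => by
          rcases Nat.lt_succ_iff_lt_or_eq.mp hj with h | h
          · exact hmin j h
          · subst h; push_neg; exact ⟨h1, h2⟩)
        (by omega)
      push_cast at this ⊢
      exact this

theorem upperScan_spec :
    ∀ (f : Nat) (x : Int) (hex : ∃ j : Nat, divisorOk (x + j) = true),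
      Nat.find hex < f → upperScan x f = x + Nat.find hex := by
  intro f
  induction f with
  | zero => intro x hex h; omega
  | succ f ih =>
    intro x hex hlt
    by_cases h0 : divisorOk x = true
    · have : Nat.find hex = 0 :=
        Nat.eq_zero_of_le_zero (Nat.find_le (by simpa using h0))
      simp [upperScan, h0, this]
    · have hpos : 0 < Nat.find hex := by
        rcases (Nat.eq_zero_or_pos (Nat.find hex)).symm with h | h
        · exact h
        · exfalso; have := Nat.find_spec hex; rw [h] at this
          simp at this; exact h0 this
      have hex' : ∃ j : Nat, divisorOk (x + 1 + j) = true := by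
        refine ⟨Nat.find hex - 1, ?_⟩
        have := Nat.find_spec hex
        have hc : x + 1 + ((Nat.find hex - 1 : Nat) : Int) = x + Nat.find hex := by
          push_cast [Nat.cast_sub hpos]; ring
        rw [hc]; exact this
      have hfind' : Nat.find hex' = Nat.find hex - 1 := by
        apply le_antisymm
        · apply Nat.find_le
          have := Nat.find_spec hex
          have hc : x + 1 + ((Nat.find hex - 1 : Nat) : Int) = x + Nat.find hex := by
            push_cast [Nat.cast_sub hpos]; ring
          rw [hc]; exact this
        · by_contra hcon
          push_neg at hcon
          have := Nat.find_spec hex'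
          have hlt2 : Nat.find hex' + 1 < Nat.find hex := by omega
          have : divisorOk (x + ((Nat.find hex' + 1 : Nat) : Int)) = true := by
            have := Nat.find_spec hex'
            have hc : x + ((Nat.find hex' + 1 : Nat) : Int) = x + 1 + Nat.find hex' := by
              push_cast; ring
            rw [hc]; exact this
          exact Nat.find_min hex hlt2 this
      have hres := ih (x + 1) hex' (by omega)
      have : upperScan x (f + 1) = upperScan (x + 1) f := by
        simp [upperScan, h0]
      rw [this, hres, hfind']
      push_cast [Nat.cast_sub hpos]; ring

theorem lowerScan_none :
    ∀ (f : Nat) (x : Int),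
      (∀ y : Int, 100 ≤ y → y ≤ x → divisorOk y = false) →
      lowerScan x f = none := by
  intro f
  induction f with
  | zero => intro x _; rfl
  | succ f ih =>
    intro x h
    by_cases hx : 100 ≤ x
    · have hx0 : divisorOk x = false := h x hx le_rfl
      simp only [lowerScan, hx, if_true, hx0, Bool.false_eq_true, if_false]
      exact ih _ (fun y hy hyx => h y hy (by omega))
    · simp [lowerScan, hx]

theorem lowerScan_some :
    ∀ (f : Nat) (x : Int)
      (hex : ∃ j : Nat, 100 ≤ x - j ∧ divisorOk (x - j) = true),
      Nat.find hex < f → lowerScan x f = some (x - Nat.find hex) := by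
  intro f
  induction f with
  | zero => intro x hex h; omega
  | succ f ih =>
    intro x hex hlt
    have hx100 : 100 ≤ x := by
      have := (Nat.find_spec hex).1
      have : (100 : Int) ≤ x - Nat.find hex := this
      omega
    by_cases h0 : divisorOk x = true
    · have : Nat.find hex = 0 :=
        Nat.eq_zero_of_le_zero (Nat.find_le (by simpa using ⟨hx100, h0⟩))
      simp [lowerScan, hx100, h0, this]
    · have hpos : 0 < Nat.find hex := by
        rcases (Nat.eq_zero_or_pos (Nat.find hex)).symm with h | h
        · exact h
        · exfalso; have := Nat.find_spec hex; rw [h] at this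
          simp at this; exact h0 this.2
      have hc : ∀ m : Nat, 0 < m → x - 1 - ((m - 1 : Nat) : Int) = x - m := by
        intro m hm; push_cast [Nat.cast_sub hm]; ring
      have hex' : ∃ j : Nat, 100 ≤ x - 1 - j ∧ divisorOk (x - 1 - j) = true := by
        refine ⟨Nat.find hex - 1, ?_⟩
        rw [hc _ hpos]; exact Nat.find_spec hex
      have hfind' : Nat.find hex' = Nat.find hex - 1 := by
        apply le_antisymm
        · apply Nat.find_le; rw [hc _ hpos]; exact Nat.find_spec hex
        · by_contra hcon
          push_neg at hcon
          have hsp := Nat.find_spec hex'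
          have hlt2 : Nat.find hex' + 1 < Nat.find hex := by omega
          have hc2 : x - ((Nat.find hex' + 1 : Nat) : Int) = x - 1 - Nat.find hex' := by
            push_cast; ring
          exact Nat.find_min hex hlt2 (by rw [hc2]; exact hsp)
      have hres := ih (x - 1) hex' (by omega)
      have hstep : lowerScan x (f + 1) = lowerScan (x - 1) f := by
        simp [lowerScan, hx100, h0]
      rw [hstep, hres, hfind', hc _ hpos]

-- ===== VERDICT (by name: the statement is the Claim_ definition above) =====
theorem gapful_spec : Claim_equal_gapful := by
  intro n hdom
  unfold Spec_gapful
  have hn : -2147483648 ≤ n ∧ n ≤ 2147483648 := by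
    simpa [Dom_gapful, pvDomInt] using hdom
  -- existence of a hit for A's loop (10^10 is gapful and ≥ n on the domain)
  have hcastA : n + ((10 ^ 10 - n).toNat : Int) = 10 ^ 10 := by
    rw [Int.toNat_of_nonneg (by omega)]; ring
  have hexA : ∃ j : Nat, gapCheckA (n - j) = true ∨ gapCheckA (n + j) = true :=
    ⟨(10 ^ 10 - n).toNat, Or.inr (by rw [hcastA]; exact gapCheckA_tenPow)⟩
  have hAle : Nat.find hexA ≤ (10 ^ 10 - n).toNat :=
    Nat.find_le (Or.inr (by rw [hcastA]; exact gapCheckA_tenPow))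
  set jA := Nat.find hexA with hjA
  set u0 : Int := if 100 ≤ n then n else 100 with hu0
  have hu0a : 100 ≤ u0 := by rw [hu0]; split <;> omega
  have hu0b : n ≤ u0 := by rw [hu0]; split <;> omega
  have hcastU : u0 + ((10 ^ 10 - u0).toNat : Int) = 10 ^ 10 := by
    rw [Int.toNat_of_nonneg (by omega)]; ring
  have hexU : ∃ j : Nat, divisorOk (u0 + j) = true :=
    ⟨(10 ^ 10 - u0).toNat, by rw [hcastU]; exact divisorOk_tenPow⟩
  have hUle : Nat.find hexU ≤ (10 ^ 10 - u0).toNat :=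
    Nat.find_le (by rw [hcastU]; exact divisorOk_tenPow)
  set jU := Nat.find hexU with hjU
  have hUspec : divisorOk (u0 + jU) = true := Nat.find_spec hexU
  have hupper : upperScan u0 ((10 ^ 10 + 1 - u0).toNat) = u0 + jU :=
    upperScan_spec _ u0 hexU (by omega)
  have hAfuel : jA < (0 : Nat) + (10 ^ 10 + 1 - n).toNat := by omega
  have hAeq := loopA_spec n hexA ((10 ^ 10 + 1 - n).toNat) 0
      (fun j hj => absurd hj (Nat.not_lt_zero j)) hAfuel
  rw [← hjA] at hAeq
  by_cases hlow : ∃ j : Nat, 100 ≤ n - j ∧ divisorOk (n - j) = true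
  · -- a gapful number exists at or below n (and ≥ 100)
    set jL := Nat.find hlow with hjL
    have hLspec : 100 ≤ n - (jL : Int) ∧ divisorOk (n - jL) = true := Nat.find_spec hlow
    have hn100 : 100 ≤ n := by have h1 := hLspec.1; omega
    have hu0n : u0 = n := by rw [hu0, if_pos hn100]
    have hlower : lowerScan n (n - 99).toNat = some (n - jL) :=
      lowerScan_some _ n hlow (by have := hLspec.1; omega)
    have hQL : gapCheckA (n - (jL : Int)) = true ∨ gapCheckA (n + (jL : Int)) = true :=
      Or.inl ((gapCheckA_true_iff _).mpr ⟨hLspec.1, hLspec.2⟩)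
    have hQU : gapCheckA (n - (jU : Int)) = true ∨ gapCheckA (n + (jU : Int)) = true := by
      refine Or.inr ((gapCheckA_true_iff _).mpr ⟨by omega, ?_⟩)
      rw [← hu0n]; rw [hu0n] at hUspec ⊢; exact hUspec
    have hAmin : jA = min jL jU := by
      apply le_antisymm
      · exact le_min (Nat.find_le hQL) (Nat.find_le hQU)
      · by_contra hcon
        push_neg at hcon
        rcases Nat.find_spec hexA with h | h
        · have : 100 ≤ n - (jA : Int) ∧ divisorOk (n - jA) = true :=
            (gapCheckA_true_iff _).mp h
          exact Nat.find_min hlow (by omega) this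
        · have h2 : 100 ≤ n + (jA : Int) ∧ divisorOk (n + jA) = true :=
            (gapCheckA_true_iff _).mp h
          have : divisorOk (u0 + (jA : Int)) = true := by rw [hu0n]; exact h2.2
          exact Nat.find_min hexU (by omega) this
    show gapfulLoopA n 0 ((10 ^ 10 + 1 - n).toNat) = gapful_alt n
    simp only [gapful_alt]
    rw [← hu0, hlower, hupper]
    by_cases hLE : jL ≤ jU
    · have hAL : jA = jL := by omega
      rw [hAeq, hAL, if_pos ((gapCheckA_true_iff _).mpr ⟨hLspec.1, hLspec.2⟩)]
      have hcond : n - (n - (jL : Int)) ≤ u0 + jU - n := by rw [hu0n]; push_cast; omega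
      simp [hcond]
      omega
    · have hAU : jA = jU := by omega
      have hnotL : gapCheckA (n - (jU : Int)) = false := by
        by_contra h
        rw [Bool.not_eq_false, gapCheckA_true_iff] at h
        exact absurd (Nat.find_le h) (by omega)
      rw [hAeq, hAU, hnotL]
      have hcond : ¬ (n - (n - (jL : Int)) ≤ u0 + jU - n) := by rw [hu0n]; push_cast; omega
      simp [hcond, hu0n]
      omega
  · -- no gapful number in [100, n]
    have hlowall : ∀ y : Int, 100 ≤ y → y ≤ n → divisorOk y = false := by
      intro y hy hyx
      have hc : n - (((n - y).toNat : Int)) = y := by rw [Int.toNat_of_nonneg (by omega)]; ring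
      by_contra h
      rw [Bool.not_eq_false] at h
      exact hlow ⟨(n - y).toNat, by rw [hc]; exact ⟨hy, h⟩⟩
    have hlower : lowerScan n (n - 99).toNat = none := lowerScan_none _ n hlowall
    have ht : n + (((u0 + (jU : Int) - n).toNat : Int)) = u0 + jU := by
      rw [Int.toNat_of_nonneg (by omega)]; ring
    have hQt : gapCheckA (n - (((u0 + (jU : Int) - n).toNat : Int))) = true ∨
        gapCheckA (n + (((u0 + (jU : Int) - n).toNat : Int))) = true :=
      Or.inr (by rw [ht]; exact (gapCheckA_true_iff _).mpr ⟨by omega, hUspec⟩)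
    have hAt : jA = (u0 + (jU : Int) - n).toNat := by
      apply le_antisymm (Nat.find_le hQt)
      by_contra hcon
      push_neg at hcon
      rcases Nat.find_spec hexA with h | h
      · have h2 := (gapCheckA_true_iff _).mp h
        rw [hlowall _ h2.1 (by have h3 := h2.1; omega)] at h2
        exact absurd h2.2 (by simp)
      · have h2 := (gapCheckA_true_iff _).mp h
        have hge : u0 ≤ n + (jA : Int) := by
          have h3 := h2.1; rw [hu0]; split <;> omega
        have hk : u0 + (((n + (jA : Int) - u0).toNat : Int)) = n + jA := by
          rw [Int.toNat_of_nonneg (by omega)]; ring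
        have : divisorOk (u0 + (((n + (jA : Int) - u0).toNat : Int))) = true := by
          rw [hk]; exact h2.2
        exact Nat.find_min hexU (by omega) this
    have hnotL : gapCheckA (n - (jA : Int)) = false := by
      rw [hAt]
      by_contra h
      rw [Bool.not_eq_false, gapCheckA_true_iff] at h
      rw [hlowall _ h.1 (by omega)] at h
      exact absurd h.2 (by simp)
    show gapfulLoopA n 0 ((10 ^ 10 + 1 - n).toNat) = gapful_alt n
    simp only [gapful_alt]
    rw [← hu0, hlower, hupper, hAeq, hnotL]
    simp only [Bool.false_eq_true, if_false]
    rw [hAt, ht]
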